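-- pv_equiv track=rewrite | github.com/RebelloPrinston/CS-B551-Elements-of-Artificial-Intelligence | a1-release/Part2/solver2023.py | inner_rotation
-- ===== SOURCE A (Python) =====
-- ROWS=5
--
-- COLS=5
--
-- def inner_rotation(current_board, move):
--     top = 1
--     bottom = ROWS - 2
--     left = 1
--     right = COLS - 2
--     if move == 'Ic':
--         temp_element = current_board[top + 1][left]
--         for i in range(left, right + 1):
--             current_element = current_board[top][i]
--             current_board[top][i] = temp_element
--             temp_element = current_element
--         top += 1
--
--         for i in range(top, bottom + 1):
--             current_element = current_board[i][right]
--             current_board[i][right] = temp_element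
--             temp_element = current_element
--         right -= 1
--
--         for i in range(right, left - 1, -1):
--             current_element = current_board[bottom][i]
--             current_board[bottom][i] = temp_element
--             temp_element = current_element
--         bottom -= 1
--
--         for i in range(bottom, top - 1, -1):
--             current_element = current_board[i][left]
--             current_board[i][left] = temp_element
--             temp_element = current_element
--         left += 1
--
--     elif move == 'Icc':
--         temp_element = current_board[top][left + 1]
--         for i in range(top, bottom + 1):
--             current_element = current_board[i][left]
--             current_board[i][left] = temp_element
--             temp_element = current_element
--         left += 1
--
--         for i in range(left, right + 1):
--             current_element = current_board[bottom][i]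
--             current_board[bottom][i] = temp_element
--             temp_element = current_element
--         bottom -= 1
--
--         for i in range(bottom, top - 1, -1):
--             current_element = current_board[i][right]
--             current_board[i][right] = temp_element
--             temp_element = current_element
--         right -= 1
--
--         for i in range(right, left - 1, -1):
--             current_element = current_board[top][i]
--             current_board[top][i] = temp_element
--             temp_element = current_element
--         top += 1
--
--     return current_board
-- ===== SOURCE B (Python) =====
-- # Ring-list rewrite: read the 8 inner-ring cells once, rotate by one, write back (simpler than A's four edge-sweep loops).
-- CW = [(1, 1), (1, 2), (1, 3), (2, 3), (3, 3), (3, 2), (3, 1), (2, 1)]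
--
-- def inner_rotation(current_board, move):
--     if move == 'Ic':
--         shift = 1
--     elif move == 'Icc':
--         shift = -1
--     else:
--         return current_board
--     vals = [current_board[r][c] for (r, c) in CW]
--     for i, (r, c) in enumerate(CW):
--         current_board[r][c] = vals[(i - shift) % 8]
--     return current_board
-- ===== Notes on version B (the rewrite author's own statement) =====
-- stated objective: simpler
-- what changed: Replaced A's four sequential edge-sweep shift loops (each threading a temp element around the ring) with one explicit list of the 8 ring coordinates in clockwise order: read all 8 values once, then write each cell from the value one step behind/ahead ((i -/+ 1) mod 8).
-- outside the precondition, e.g. on inner_rotation([[1, 2], [3, 4]], 'Ic'): A raises IndexError, B raises IndexError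
import Mathlib
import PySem

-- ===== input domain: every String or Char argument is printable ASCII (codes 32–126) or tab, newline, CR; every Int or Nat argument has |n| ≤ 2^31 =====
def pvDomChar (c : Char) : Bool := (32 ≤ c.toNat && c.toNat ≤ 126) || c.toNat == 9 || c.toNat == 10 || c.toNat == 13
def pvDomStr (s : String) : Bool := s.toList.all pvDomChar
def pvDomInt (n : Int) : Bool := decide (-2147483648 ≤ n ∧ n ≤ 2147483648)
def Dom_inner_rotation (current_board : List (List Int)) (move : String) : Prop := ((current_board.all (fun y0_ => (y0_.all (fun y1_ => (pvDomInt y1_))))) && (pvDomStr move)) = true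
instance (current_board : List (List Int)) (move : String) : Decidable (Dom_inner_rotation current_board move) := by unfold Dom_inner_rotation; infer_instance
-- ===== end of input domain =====

-- NOTE: the equivalence proved here is about the RETURN value only; both Pythons mutate
-- and return the same input list, B's single ring pass replaces A's four edge-sweep loops.

-- ===== PORT A =====
-- board[r][c]; every row/column index in both programs is a literal non-negative in
-- range under Pre_, so Python's b[r][c] is exactly getD/set (no negative wraparound).
def pvBget (b : List (List Int)) (r c : Nat) : Int :=
  (b.getD r []).getD c 0

-- board[r][c] = v (in-place assignment, functional)
def pvBset (b : List (List Int)) (r c : Nat) (v : Int) : List (List Int) :=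
  b.set r ((b.getD r []).set c v)

-- one step of A's shifting loops: write temp into the cell, keep the old cell as new temp
def pvStep (p : List (List Int) × Int) (r c : Nat) : List (List Int) × Int :=
  (pvBset p.1 r c p.2, pvBget p.1 r c)

def inner_rotation (current_board : List (List Int)) (move : String) : List (List Int) :=
  if move == "Ic" then
    let s0 : List (List Int) × Int := (current_board, pvBget current_board 2 1)
    let s1 := (PySem.List.pyRange 1 4 1).foldl (fun p i => pvStep p 1 i.toNat) s0
    let s2 := (PySem.List.pyRange 2 4 1).foldl (fun p i => pvStep p i.toNat 3) s1
    let s3 := (PySem.List.pyRange 2 0 (-1)).foldl (fun p i => pvStep p 3 i.toNat) s2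
    let s4 := (PySem.List.pyRange 2 1 (-1)).foldl (fun p i => pvStep p i.toNat 1) s3
    s4.1
  else if move == "Icc" then
    let s0 : List (List Int) × Int := (current_board, pvBget current_board 1 2)
    let s1 := (PySem.List.pyRange 1 4 1).foldl (fun p i => pvStep p i.toNat 1) s0
    let s2 := (PySem.List.pyRange 2 4 1).foldl (fun p i => pvStep p 3 i.toNat) s1
    let s3 := (PySem.List.pyRange 2 0 (-1)).foldl (fun p i => pvStep p i.toNat 3) s2
    let s4 := (PySem.List.pyRange 2 1 (-1)).foldl (fun p i => pvStep p 1 i.toNat) s3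
    s4.1
  else
    current_board

-- ===== PORT B =====
-- the 8 inner-ring coordinates in clockwise order
def pvCW : List (Nat × Nat) := [(1,1),(1,2),(1,3),(2,3),(3,3),(3,2),(3,1),(2,1)]

def pvAltCore (b : List (List Int)) (shift : Int) : List (List Int) :=
  let vals := pvCW.map (fun rc => pvBget b rc.1 rc.2)
  (PySem.List.enumerate pvCW).foldl
    (fun acc p =>
      pvBset acc p.2.1 p.2.2
        (PySem.List.pyGetD vals (PySem.Int.mod (p.1 - shift) 8) 0)) b

def inner_rotation_alt (current_board : List (List Int)) (move : String) : List (List Int) :=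
  if move == "Ic" then pvAltCore current_board 1
  else if move == "Icc" then pvAltCore current_board (-1)
  else current_board

-- ===== PRECONDITION & SPEC =====
-- Pre_ excludes boards too small for the ring (fewer than 4 rows, or a row 1..3 shorter
-- than 4) when the move rotates: Python A raises IndexError there.
def Pre_inner_rotation (current_board : List (List Int)) (move : String) : Prop :=
  (move = "Ic" ∨ move = "Icc") →
    (4 ≤ current_board.length ∧ 4 ≤ (current_board.getD 1 []).length ∧
     4 ≤ (current_board.getD 2 []).length ∧ 4 ≤ (current_board.getD 3 []).length)
instance (current_board : List (List Int)) (move : String) : Decidable (Pre_inner_rotation current_board move) := by unfold Pre_inner_rotation; infer_instance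

def pvWitness_inner_rotation : List (List Int) × String :=
  ([[0,1,2,3,4],[5,6,7,8,9],[10,11,12,13,14],[15,16,17,18,19],[20,21,22,23,24]], "Ic")

def Spec_inner_rotation (current_board : List (List Int)) (move : String) (out : List (List Int)) : Prop := out = inner_rotation_alt current_board move
instance (current_board : List (List Int)) (move : String) (out : List (List Int)) : Decidable (Spec_inner_rotation current_board move out) := by unfold Spec_inner_rotation; infer_instance

-- ===== CLAIM (what is proved, stated in full; the proofs are below) =====
def Claim_equal_inner_rotation : Prop := ∀ (current_board : List (List Int)) (move : String), Dom_inner_rotation current_board move → Pre_inner_rotation current_board move → Spec_inner_rotation current_board move (inner_rotation current_board move)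

-- ===== LEMMAS AND PROOFS =====

theorem ex4 {α : Type} (l : List α) (h : 4 ≤ l.length) :
    ∃ a b c d t, l = a :: b :: c :: d :: t := by
  match l with
  | a :: b :: c :: d :: t => exact ⟨a, b, c, d, t, rfl⟩
  | [] | [_] | [_,_] | [_,_,_] => simp at h

set_option maxHeartbeats 2000000 in
theorem core_eq (r0 : List Int) (a1 b1 c1 d1 : Int) (t1 : List Int)
    (a2 b2 c2 d2 : Int) (t2 : List Int) (a3 b3 c3 d3 : Int) (t3 : List Int)
    (rest : List (List Int)) (move : String) :
    inner_rotation (r0 :: (a1::b1::c1::d1::t1) :: (a2::b2::c2::d2::t2) :: (a3::b3::c3::d3::t3) :: rest) move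
      = inner_rotation_alt (r0 :: (a1::b1::c1::d1::t1) :: (a2::b2::c2::d2::t2) :: (a3::b3::c3::d3::t3) :: rest) move := by
  by_cases h1 : move = "Ic"
  · subst h1
    simp [inner_rotation, inner_rotation_alt, pvAltCore, pvCW, pvStep, pvBget, pvBset,
      PySem.List.enumerate, show PySem.List.pyRange 1 4 1 = [1,2,3] from by decide,
      show PySem.List.pyRange 2 4 1 = [2,3] from by decide,
      show PySem.List.pyRange 2 0 (-1) = [2,1] from by decide,
      show PySem.List.pyRange 2 1 (-1) = [2] from by decide,
      PySem.List.pyGetD, PySem.List.pyGet?, PySem.List.pyIdx?, PySem.Int.mod, List.foldl]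
  · by_cases h2 : move = "Icc"
    · subst h2
      simp [inner_rotation, inner_rotation_alt, pvAltCore, pvCW, pvStep, pvBget, pvBset,
        PySem.List.enumerate, show PySem.List.pyRange 1 4 1 = [1,2,3] from by decide,
        show PySem.List.pyRange 2 4 1 = [2,3] from by decide,
        show PySem.List.pyRange 2 0 (-1) = [2,1] from by decide,
        show PySem.List.pyRange 2 1 (-1) = [2] from by decide,
        PySem.List.pyGetD, PySem.List.pyGet?, PySem.List.pyIdx?, PySem.Int.mod, List.foldl]
    · simp [inner_rotation, inner_rotation_alt, h1, h2]

-- ===== VERDICT (by name: the statement is the Claim_ definition above) =====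
theorem inner_rotation_spec : Claim_equal_inner_rotation := by
  intro board move _ hpre
  unfold Spec_inner_rotation
  by_cases hm : move = "Ic" ∨ move = "Icc"
  · obtain ⟨hlen, h1, h2, h3⟩ := hpre hm
    obtain ⟨r0, r1, r2, r3, rest, rfl⟩ : ∃ r0 r1 r2 r3 rest, board = r0 :: r1 :: r2 :: r3 :: rest := by
      match board, hlen with
      | a :: b :: c :: d :: t, _ => exact ⟨a, b, c, d, t, rfl⟩
    simp only [List.getD_cons_succ, List.getD_cons_zero] at h1 h2 h3
    obtain ⟨a1, b1, c1, d1, t1, rfl⟩ := ex4 r1 h1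
    obtain ⟨a2, b2, c2, d2, t2, rfl⟩ := ex4 r2 h2
    obtain ⟨a3, b3, c3, d3, t3, rfl⟩ := ex4 r3 h3
    exact core_eq ..
  · rw [not_or] at hm
    simp [inner_rotation, inner_rotation_alt, hm.1, hm.2]
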